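-- pv_equiv track=rewrite | github.com/Seraphic-Studio/JE2BE-Resource-Pack-Converter | converters/bedrock_generator.py | _convert_lang_key
-- ===== SOURCE A (Python) =====
-- def _convert_lang_key(java_key: str) -> str:
--     """Convert Java language key to Bedrock equivalent"""
--     key_mappings = {
--         "block.minecraft.": "tile.",
--         "item.minecraft.": "item.",
--         "entity.minecraft.": "entity.",
--         "enchantment.minecraft.": "enchantment.",
--         "effect.minecraft.": "effect.",
--         "biome.minecraft.": "biome."
--     }
--
--     for java_prefix, bedrock_prefix in key_mappings.items():
--         if java_key.startswith(java_prefix):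
--             return java_key.replace(java_prefix, bedrock_prefix, 1)
--
--     return java_key
-- ===== SOURCE B (Python) =====
-- def _convert_lang_key(java_key: str) -> str:
--     """Convert Java language key to Bedrock equivalent"""
--     head, sep, tail = java_key.partition(".minecraft.")
--     mapping = {
--         "block": "tile.",
--         "item": "item.",
--         "entity": "entity.",
--         "enchantment": "enchantment.",
--         "effect": "effect.",
--         "biome": "biome.",
--     }
--     if sep and head in mapping:
--         return mapping[head] + tail
--     return java_key
-- ===== Notes on version B (the rewrite author's own statement) =====
-- stated objective: idiomatic
-- what changed: Replaces the six-way startswith scan and count-limited replace with a single partition at the first '.minecraft.' plus one dict lookup keyed on the bare category head.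
import Mathlib
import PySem

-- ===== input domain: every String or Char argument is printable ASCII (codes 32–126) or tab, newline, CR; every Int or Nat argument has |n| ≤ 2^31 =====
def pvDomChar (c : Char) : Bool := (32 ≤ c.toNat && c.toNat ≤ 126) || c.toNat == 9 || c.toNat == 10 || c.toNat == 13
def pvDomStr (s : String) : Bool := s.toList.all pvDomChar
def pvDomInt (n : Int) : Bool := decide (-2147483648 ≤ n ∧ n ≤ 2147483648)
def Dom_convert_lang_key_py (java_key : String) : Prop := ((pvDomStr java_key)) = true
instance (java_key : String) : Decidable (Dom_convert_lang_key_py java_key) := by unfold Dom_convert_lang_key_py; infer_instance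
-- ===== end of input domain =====

-- B replaces A's six-way startswith scan with one partition at '.minecraft.' and a dict lookup on the head (idiomatic).

-- ===== PORT A =====
-- key_mappings, in dict insertion order, as lists of code points
def pvKeyMappings : List (List Char × List Char) :=
  [("block.minecraft.".toList, "tile.".toList),
   ("item.minecraft.".toList, "item.".toList),
   ("entity.minecraft.".toList, "entity.".toList),
   ("enchantment.minecraft.".toList, "enchantment.".toList),
   ("effect.minecraft.".toList, "effect.".toList),
   ("biome.minecraft.".toList, "biome.".toList)]

-- the for-loop over key_mappings.items(); `java_key.replace(p, b, 1)` is ported as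
-- `b ++ s.drop p.length`, exact here because the guard guarantees p is a prefix of s,
-- so the single occurrence replaced is the one at index 0.
def pvConvALoop : List (List Char × List Char) → List Char → List Char
  | [], s => s
  | (p, b) :: rest, s =>
    if PySem.Chars.startswith s p then b ++ s.drop p.length
    else pvConvALoop rest s

def convert_lang_key_py (java_key : String) : String :=
  String.ofList (pvConvALoop pvKeyMappings java_key.toList)

-- ===== PORT B =====
def pvSep : List Char := ".minecraft.".toList

-- str.partition(sep): split at the FIRST occurrence of sep (hand port, exact;
-- PySem.Chars.find is s.find(sep))
def pvPartition (s sep : List Char) : List Char × List Char × List Char :=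
  let i := PySem.Chars.find s sep
  if i = -1 then (s, [], [])
  else (s.take i.toNat, sep, s.drop (i.toNat + sep.length))

def pvCatDict : PySem.Dict (List Char) (List Char) :=
  PySem.Dict.ofList
    [("block".toList, "tile.".toList),
     ("item".toList, "item.".toList),
     ("entity".toList, "entity.".toList),
     ("enchantment".toList, "enchantment.".toList),
     ("effect".toList, "effect.".toList),
     ("biome".toList, "biome.".toList)]

def convert_lang_key_py_alt (java_key : String) : String :=
  let r := pvPartition java_key.toList pvSep
  if r.2.1 ≠ [] then
    match PySem.Dict.get? pvCatDict r.1 with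
    | some pre => String.ofList (pre ++ r.2.2)
    | none => java_key
  else java_key

-- ===== PRECONDITION & SPEC =====
def Spec_convert_lang_key_py (java_key : String) (out : String) : Prop := out = convert_lang_key_py_alt java_key
instance (java_key : String) (out : String) : Decidable (Spec_convert_lang_key_py java_key out) := by unfold Spec_convert_lang_key_py; infer_instance

-- ===== CLAIM (what is proved, stated in full; the proofs are below) =====
def Claim_equal_convert_lang_key_py : Prop := ∀ (java_key : String), Dom_convert_lang_key_py java_key → Spec_convert_lang_key_py java_key (convert_lang_key_py java_key)

-- ===== LEMMAS AND PROOFS =====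

-- if s = cat ++ (sep ++ t) with '.' ∉ cat, the FIRST occurrence of pvSep in s is at cat.length
theorem pv_find_cat (cat t : List Char) (hdot : '.' ∉ cat) :
    PySem.Chars.find (cat ++ (pvSep ++ t)) pvSep = (cat.length : Int) := by
  have hocc : pvSep <+: (cat ++ (pvSep ++ t)).drop cat.length := by
    rw [List.drop_left]
    exact List.prefix_append _ _
  have hnonneg : 0 ≤ PySem.Chars.find (cat ++ (pvSep ++ t)) pvSep := by
    rw [PySem.Chars.find_nonneg_iff]
    exact ⟨cat, t, by simp⟩
  obtain ⟨hpref, hmin⟩ := PySem.Chars.find_spec hnonneg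
  set k := (PySem.Chars.find (cat ++ (pvSep ++ t)) pvSep).toNat with hk
  have hle : k ≤ cat.length := by
    by_contra h
    exact hmin cat.length (by omega) hocc
  have hnotlt : ¬ k < cat.length := by
    intro hlt
    have h0 : ((cat ++ (pvSep ++ t)).drop k)[0]? = some '.' := by
      obtain ⟨u, hu⟩ := hpref
      rw [← hu, List.getElem?_append_left (by simp [pvSep])]
      rfl
    have h1 : ((cat ++ (pvSep ++ t)).drop k)[0]? = (cat ++ (pvSep ++ t))[k]? := by simp
    have h2 : (cat ++ (pvSep ++ t))[k]? = cat[k]? :=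
      List.getElem?_append_left hlt
    have h3 : cat[k]? = some '.' := by rw [← h2, ← h1, h0]
    exact hdot (List.mem_of_getElem? h3)
  omega

-- if pvSep is found in s at position i, then s starts with s.take i ++ pvSep
theorem pv_startswith_of_find (s : List Char) (hnonneg : 0 ≤ PySem.Chars.find s pvSep) :
    (s.take (PySem.Chars.find s pvSep).toNat ++ pvSep) <+: s := by
  obtain ⟨hpref, -⟩ := PySem.Chars.find_spec hnonneg
  obtain ⟨u, hu⟩ := hpref
  refine ⟨u, ?_⟩
  conv_rhs => rw [← List.take_append_drop (PySem.Chars.find s pvSep).toNat s]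
  rw [List.append_assoc, hu]

-- B on an input that decomposes as category ++ '.minecraft.' ++ tail
theorem pv_case (cat bpre t : List Char) (hdot : '.' ∉ cat)
    (hget : PySem.Dict.get? pvCatDict cat = some bpre)
    (s : String) (hs : s.toList = cat ++ (pvSep ++ t)) :
    convert_lang_key_py_alt s = String.ofList (bpre ++ t) := by
  have hfind := pv_find_cat cat t hdot
  have hne : ((cat.length : Int)) ≠ -1 := by
    have := Int.natCast_nonneg cat.length; omega
  have htake : (cat ++ (pvSep ++ t)).take cat.length = cat := by simp
  have hdrop : (cat ++ (pvSep ++ t)).drop (cat.length + pvSep.length) = t := by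
    have h : cat ++ (pvSep ++ t) = (cat ++ pvSep) ++ t := by simp
    rw [h, ← List.length_append, List.drop_left]
  unfold convert_lang_key_py_alt pvPartition
  simp only [hs, hfind, if_neg hne, Int.toNat_natCast, htake, hdrop, hget]
  simp [pvSep]

theorem convert_lang_key_py_spec : Claim_equal_convert_lang_key_py := by
  intro s _
  unfold Spec_convert_lang_key_py
  simp only [convert_lang_key_py, pvKeyMappings, pvConvALoop]
  split_ifs with h1 h2 h3 h4 h5 h6
  · rw [PySem.Chars.startswith_iff] at h1
    obtain ⟨u, hu⟩ := h1
    have heq : "block.minecraft.".toList = "block".toList ++ pvSep := by decide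
    rw [heq, List.append_assoc] at hu
    rw [pv_case "block".toList "tile.".toList u (by decide) (by decide) s hu.symm]
    rw [← hu]; simp [pvSep]
  · rw [PySem.Chars.startswith_iff] at h2
    obtain ⟨u, hu⟩ := h2
    have heq : "item.minecraft.".toList = "item".toList ++ pvSep := by decide
    rw [heq, List.append_assoc] at hu
    rw [pv_case "item".toList "item.".toList u (by decide) (by decide) s hu.symm]
    rw [← hu]; simp [pvSep]
  · rw [PySem.Chars.startswith_iff] at h3
    obtain ⟨u, hu⟩ := h3
    have heq : "entity.minecraft.".toList = "entity".toList ++ pvSep := by decide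
    rw [heq, List.append_assoc] at hu
    rw [pv_case "entity".toList "entity.".toList u (by decide) (by decide) s hu.symm]
    rw [← hu]; simp [pvSep]
  · rw [PySem.Chars.startswith_iff] at h4
    obtain ⟨u, hu⟩ := h4
    have heq : "enchantment.minecraft.".toList = "enchantment".toList ++ pvSep := by decide
    rw [heq, List.append_assoc] at hu
    rw [pv_case "enchantment".toList "enchantment.".toList u (by decide) (by decide) s hu.symm]
    rw [← hu]; simp [pvSep]
  · rw [PySem.Chars.startswith_iff] at h5
    obtain ⟨u, hu⟩ := h5
    have heq : "effect.minecraft.".toList = "effect".toList ++ pvSep := by decide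
    rw [heq, List.append_assoc] at hu
    rw [pv_case "effect".toList "effect.".toList u (by decide) (by decide) s hu.symm]
    rw [← hu]; simp [pvSep]
  · rw [PySem.Chars.startswith_iff] at h6
    obtain ⟨u, hu⟩ := h6
    have heq : "biome.minecraft.".toList = "biome".toList ++ pvSep := by decide
    rw [heq, List.append_assoc] at hu
    rw [pv_case "biome".toList "biome.".toList u (by decide) (by decide) s hu.symm]
    rw [← hu]; simp [pvSep]
  · -- no prefix matched: B must return s unchanged
    have halt : convert_lang_key_py_alt s = s := by
      unfold convert_lang_key_py_alt pvPartition
      by_cases hf : PySem.Chars.find s.toList pvSep = -1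
      · simp [hf]
      · have hnonneg : 0 ≤ PySem.Chars.find s.toList pvSep := by
          have := PySem.Chars.neg_one_le_find s.toList pvSep; omega
        have hpre := pv_startswith_of_find s.toList hnonneg
        simp only [hf]
        rcases hk : PySem.Dict.get? pvCatDict
            (s.toList.take (PySem.Chars.find s.toList pvSep).toNat) with _ | pre
        · simp [hk]
        · exfalso
          have hmem : s.toList.take (PySem.Chars.find s.toList pvSep).toNat ∈ pvCatDict.keys := by
            by_contra hnm
            rw [← PySem.Dict.get?_eq_none_iff_not_mem_keys] at hnm
            simp [hk] at hnm
          have hkeys : pvCatDict.keys =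
              ["block".toList, "item".toList, "entity".toList,
               "enchantment".toList, "effect".toList, "biome".toList] := by decide
          rw [hkeys] at hmem
          simp only [List.mem_cons, List.not_mem_nil, or_false] at hmem
          rcases hmem with hc | hc | hc | hc | hc | hc <;> rw [hc] at hpre
          · apply h1
            rw [PySem.Chars.startswith_iff]
            have heq : "block.minecraft.".toList = "block".toList ++ pvSep := by decide
            rw [heq]; exact hpre
          · apply h2
            rw [PySem.Chars.startswith_iff]
            have heq : "item.minecraft.".toList = "item".toList ++ pvSep := by decide
            rw [heq]; exact hpre
          · apply h3
            rw [PySem.Chars.startswith_iff]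
            have heq : "entity.minecraft.".toList = "entity".toList ++ pvSep := by decide
            rw [heq]; exact hpre
          · apply h4
            rw [PySem.Chars.startswith_iff]
            have heq : "enchantment.minecraft.".toList = "enchantment".toList ++ pvSep := by decide
            rw [heq]; exact hpre
          · apply h5
            rw [PySem.Chars.startswith_iff]
            have heq : "effect.minecraft.".toList = "effect".toList ++ pvSep := by decide
            rw [heq]; exact hpre
          · apply h6
            rw [PySem.Chars.startswith_iff]
            have heq : "biome.minecraft.".toList = "biome".toList ++ pvSep := by decide
            rw [heq]; exact hpre
    rw [halt]
    simp
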